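-- pv_equiv track=rewrite | github.com/WillBanasik/socai | tools/kql_playbooks.py | _sanitise_kql_value
-- ===== SOURCE A (Python) =====
-- def _sanitise_kql_value(value: str) -> str:
--     """Escape a parameter value for safe inline KQL substitution.
--
--     Rejects newlines/control characters (would let a caller inject extra
--     pipeline operators). Escapes backslashes and double-quotes so values
--     cannot break out of a ``"..."`` literal.
--     """
--     if value is None:
--         return ""
--     value = str(value)
--     if any(ord(c) < 0x20 for c in value):
--         raise ValueError(
--             f"KQL parameter value contains a control character — rejected: {value!r}"
--         )
--     return value.replace("\\", "\\\\").replace('"', '\\"')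
-- ===== SOURCE B (Python) =====
-- def _sanitise_kql_value(value: str) -> str:
--     """Single-pass variant: validate and escape in one traversal of the string."""
--     if value is None:
--         return ""
--     value = str(value)
--     out = []
--     for c in value:
--         if ord(c) < 0x20:
--             raise ValueError(
--                 f"KQL parameter value contains a control character — rejected: {value!r}"
--             )
--         if c == "\\":
--             out.append("\\\\")
--         elif c == '"':
--             out.append('\\"')
--         else:
--             out.append(c)
--     return "".join(out)
-- ===== Notes on version B (the rewrite author's own statement) =====
-- stated objective: alternative
-- what changed: Fuses A's separate any()-validation scan and the two chained .replace passes into one loop that validates each character and emits its escaped form, joining once at the end.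
import Mathlib
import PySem

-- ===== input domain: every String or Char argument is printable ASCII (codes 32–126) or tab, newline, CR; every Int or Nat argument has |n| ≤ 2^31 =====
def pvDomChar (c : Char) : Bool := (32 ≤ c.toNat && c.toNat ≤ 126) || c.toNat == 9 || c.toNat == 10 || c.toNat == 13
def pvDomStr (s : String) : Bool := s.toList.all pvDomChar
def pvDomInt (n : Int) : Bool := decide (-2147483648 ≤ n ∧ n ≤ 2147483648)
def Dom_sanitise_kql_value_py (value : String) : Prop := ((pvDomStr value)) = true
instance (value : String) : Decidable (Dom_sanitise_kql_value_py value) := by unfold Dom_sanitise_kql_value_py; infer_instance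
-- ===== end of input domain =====

-- B fuses A's validation scan and the two .replace passes into a single per-character traversal (objective: alternative).
-- The 'value is None' branch is unreachable for a String argument and is dropped in both ports.

-- ===== PORT A =====
def sanitise_kql_value_py (value : String) : String :=
  -- 'if any(ord(c) < 0x20 for c in value): raise ValueError(...)' — the raise path is excluded by Pre_
  if value.toList.any (fun c => c.toNat < 0x20) then value
  else PySem.Str.replace (PySem.Str.replace value "\\" "\\\\") "\"" "\\\""

-- ===== PORT B =====
def sanitise_kql_value_py_alt (value : String) : String :=
  String.ofList (value.toList.flatMap (fun c =>
    if c.toNat < 0x20 then [c]  -- 'raise ValueError(...)' in Source B — excluded by Pre_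
    else if c = '\\' then ['\\', '\\']
    else if c = '"' then ['\\', '"']
    else [c]))

-- ===== PRECONDITION & SPEC =====
-- Pre_ excludes exactly the inputs on which A raises ValueError: strings containing a control character (code < 0x20).
def Pre_sanitise_kql_value_py (value : String) : Prop :=
  value.toList.all (fun c => 32 ≤ c.toNat) = true
instance (value : String) : Decidable (Pre_sanitise_kql_value_py value) := by
  unfold Pre_sanitise_kql_value_py; infer_instance
def pvWitness_sanitise_kql_value_py : String := "a\\\"b"

def Spec_sanitise_kql_value_py (value : String) (out : String) : Prop := out = sanitise_kql_value_py_alt value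
instance (value : String) (out : String) : Decidable (Spec_sanitise_kql_value_py value out) := by unfold Spec_sanitise_kql_value_py; infer_instance

-- ===== CLAIM (what is proved, stated in full; the proofs are below) =====
def Claim_equal_sanitise_kql_value_py : Prop := ∀ (value : String), Dom_sanitise_kql_value_py value → Pre_sanitise_kql_value_py value → Spec_sanitise_kql_value_py value (sanitise_kql_value_py value)

-- ===== LEMMAS AND PROOFS =====

-- replace with a single-character pattern is a flatMap over the characters
theorem replace_go_single (x : Char) (new : List Char) :
    ∀ (cs : List Char) (fuel : Nat) (acc : List Char), cs.length ≤ fuel →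
      PySem.Chars.replace.go [x] new fuel cs acc
        = acc.reverse ++ cs.flatMap (fun c => if c = x then new else [c]) := by
  intro cs
  induction cs with
  | nil =>
      intro fuel acc _
      cases fuel <;> simp [PySem.Chars.replace.go]
  | cons c t ih =>
      intro fuel acc hle
      cases fuel with
      | zero => simp at hle
      | succ n =>
        by_cases h : c = x
        · subst h
          have : List.isPrefixOf [c] (c :: t) = true := by simp [List.isPrefixOf]
          rw [PySem.Chars.replace.go]
          simp only [this, if_true]
          rw [show List.drop [c].length (c :: t) = t from rfl,
              ih _ _ (by simpa using Nat.le_of_succ_le_succ hle)]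
          simp
        · have : List.isPrefixOf [x] (c :: t) = false := by
            simp [List.isPrefixOf]
            intro hxc; exact h hxc.symm
          rw [PySem.Chars.replace.go]
          simp only [this, Bool.false_eq_true, if_false]
          rw [ih _ _ (by simpa using Nat.le_of_succ_le_succ hle)]
          simp [h]

theorem replace_single (cs : List Char) (x : Char) (new : List Char) :
    PySem.Chars.replace cs [x] new = cs.flatMap (fun c => if c = x then new else [c]) := by
  simp only [PySem.Chars.replace, List.isEmpty_cons, Bool.false_eq_true, if_false]
  simpa using replace_go_single x new cs cs.length [] le_rfl

theorem chain_eq_flatMap (cs : List Char) :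
    PySem.Chars.replace (PySem.Chars.replace cs ['\\'] ['\\', '\\']) ['"'] ['\\', '"']
      = cs.flatMap (fun c =>
          if c.toNat < 0x20 then [c]
          else if c = '\\' then ['\\', '\\']
          else if c = '"' then ['\\', '"']
          else [c]) := by
  rw [replace_single, replace_single, List.flatMap_assoc]
  apply List.flatMap_congr
  intro c _
  by_cases h1 : c = '\\'
  · subst h1; decide
  · by_cases h2 : c = '"'
    · subst h2; decide
    · by_cases h3 : c.toNat < 0x20 <;> simp [h1, h2, h3]

-- ===== VERDICT (by name: the statement is the Claim_ definition above) =====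
theorem sanitise_kql_value_py_spec : Claim_equal_sanitise_kql_value_py := by
  intro value _ hpre
  unfold Spec_sanitise_kql_value_py sanitise_kql_value_py sanitise_kql_value_py_alt
  have hany : value.toList.any (fun c => c.toNat < 0x20) = false := by
    unfold Pre_sanitise_kql_value_py at hpre
    simp only [List.all_eq_true, decide_eq_true_eq] at hpre
    simp only [List.any_eq_false, decide_eq_true_eq]
    intro c hc
    exact Nat.not_lt.mpr (hpre c hc)
  rw [hany]
  simp only [Bool.false_eq_true, if_false]
  rw [PySem.Str.replace, PySem.Str.toList_replace]
  congr 1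
  simpa using chain_eq_flatMap value.toList
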